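-- pv_equiv track=rewrite | github.com/katarzynaadamczyk/Codewars_tasks_in_Python | Play_with_arrays/Circle/Circles.py | solution
-- ===== SOURCE A (Python) =====
-- from typing import List
--
-- def solution(nums: List[int]) -> int:
--
--     # create an array filled with 1 if there is a corresponding even sum in the circle
--     # and filled with 0 otherwise
--     # count_of_evens - stores the count of 1's in the array
--
--     evens, count_of_evens = [], 0
--     for i in range(-1, len(nums) - 1):
--         if (nums[i] + nums[i+1]) % 2 == 0:
--             evens.append(1)
--             count_of_evens += 1
--         else:
--             evens.append(0)
--
--     if count_of_evens == len(evens):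
--         return len(evens) // 2
--     if count_of_evens < 2:
--         return count_of_evens
--
--     count_neighbours_1 = 0
--     count_neighbours_2 = 0
--
--     for i in range(len(evens)):
--         if evens[i] == 1 and evens[i - 1] == 1:
--             count_neighbours_1 += 1
--             if evens[i-2] == 1:
--                 count_neighbours_2 += 1
--
--     return count_of_evens - count_neighbours_1 + count_neighbours_2
-- ===== SOURCE B (Python) =====
-- def solution(nums):
--     n = len(nums)
--     edges = [(nums[i-1] + nums[i]) % 2 == 0 for i in range(n)]
--     if all(edges):
--         return n // 2
--     # rotate the circular edge array so it ends just after a False edge: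
--     # no run of True edges wraps, so one linear scan over runs suffices
--     k = edges.index(False)
--     rot = edges[k+1:] + edges[:k+1]
--     ans = run = 0
--     for b in rot:
--         if b:
--             run += 1
--         else:
--             if run:
--                 ans += max(run - 1, 1)
--             run = 0
--     return ans
-- ===== Notes on version B (the rewrite author's own statement) =====
-- stated objective: alternative
-- what changed: B replaces A's inclusion-exclusion over circular adjacent pairs and triples of the edge-parity array by rotating that array past a False edge and doing one linear run-length scan (each run of L even edges contributes max(L-1,1)), which also removes A's separate count<2 branch.
import Mathlib
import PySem

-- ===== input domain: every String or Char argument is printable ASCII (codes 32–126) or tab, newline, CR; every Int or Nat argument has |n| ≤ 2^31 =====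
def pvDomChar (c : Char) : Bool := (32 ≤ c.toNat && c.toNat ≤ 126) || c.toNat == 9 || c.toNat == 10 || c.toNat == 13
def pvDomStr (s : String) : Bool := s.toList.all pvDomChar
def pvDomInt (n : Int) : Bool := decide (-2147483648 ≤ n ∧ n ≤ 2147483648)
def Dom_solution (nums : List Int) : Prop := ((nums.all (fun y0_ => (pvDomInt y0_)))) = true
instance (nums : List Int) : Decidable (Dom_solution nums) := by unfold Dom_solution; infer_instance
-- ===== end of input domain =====

-- B replaces A's circular adjacent-pair/triple inclusion–exclusion count by a rotation of the
-- cyclic edge-parity array past a False edge followed by a single linear run-length scan (alternative).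

-- ===== PORT A =====
def solution (nums : List Int) : Int :=
  let p := (PySem.List.pyRange (-1) ((nums.length : Int) - 1) 1).foldl
    (fun (st : List Int × Int) i =>
      if PySem.Int.mod (PySem.List.pyGetD nums i 0 + PySem.List.pyGetD nums (i + 1) 0) 2 = 0 then
        (st.1 ++ [1], st.2 + 1)
      else
        (st.1 ++ [0], st.2)) ([], 0)
  let evens := p.1
  let count := p.2
  if count = (evens.length : Int) then
    PySem.Int.floordiv (evens.length : Int) 2
  else if count < 2 then
    count
  else
    let q := (PySem.List.pyRange 0 (evens.length : Int) 1).foldl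
      (fun (st : Int × Int) i =>
        if PySem.List.pyGetD evens i 0 = 1 ∧ PySem.List.pyGetD evens (i - 1) 0 = 1 then
          (st.1 + 1, if PySem.List.pyGetD evens (i - 2) 0 = 1 then st.2 + 1 else st.2)
        else st) (0, 0)
    count - q.1 + q.2

-- ===== PORT B =====
def solution_alt (nums : List Int) : Int :=
  let n : Int := (nums.length : Int)
  let edges : List Bool := (PySem.List.pyRange 0 n 1).map
    (fun i => PySem.Int.mod (PySem.List.pyGetD nums (i - 1) 0 + PySem.List.pyGetD nums i 0) 2 == 0)
  if edges.all id then
    PySem.Int.floordiv n 2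
  else
    -- a False edge exists on this branch, so Python's .index cannot raise; the 0 default is unreachable
    let k : Int := ((PySem.List.index? edges false).getD 0 : Nat)
    let rot := PySem.List.slice edges (some (k + 1)) none ++ PySem.List.slice edges none (some (k + 1))
    (rot.foldl
      (fun (st : Int × Int) b =>
        if b then (st.1, st.2 + 1)
        else (if st.2 ≠ 0 then st.1 + max (st.2 - 1) 1 else st.1, 0))
      (0, 0)).1

-- ===== PRECONDITION & SPEC =====
def Spec_solution (nums : List Int) (out : Int) : Prop := out = solution_alt nums
instance (nums : List Int) (out : Int) : Decidable (Spec_solution nums out) := by unfold Spec_solution; infer_instance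

-- ===== CLAIM (what is proved, stated in full; the proofs are below) =====
def Claim_equal_solution : Prop := ∀ (nums : List Int), Dom_solution nums → Spec_solution nums (solution nums)

-- ===== LEMMAS AND PROOFS =====

-- Window value of one circular position: [c] - [b and c] + [a and b and c]
def pvToI (b : Bool) : Int := if b then 1 else 0

def pvWin (a b c : Bool) : Int := pvToI c - pvToI (b && c) + pvToI (a && b && c)

-- Sum of window values along a list, threading the two previous elements
def pvLinSum : Bool → Bool → List Bool → Int
  | _, _, [] => 0
  | a, b, c :: l => pvWin a b c + pvLinSum b c l

-- Last two elements of (a :: b :: l)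
def pvP2 : Bool → Bool → List Bool → Bool × Bool
  | a, b, [] => (a, b)
  | _, b, c :: l => pvP2 b c l

-- Circular window sum: previous-two seeds are the list's own last two elements
def pvCirc (l : List Bool) : Int :=
  pvLinSum (pvP2 false false l).1 (pvP2 false false l).2 l

-- Length of the trailing run of `true`s, given the incoming run length
def pvTrail : Int → List Bool → Int
  | r, [] => r
  | r, c :: l => pvTrail (if c then r + 1 else 0) l

-- Contribution of a pending run of length r
def pvPc (r : Int) : Int := if r ≠ 0 then max (r - 1) 1 else 0

def pvWinList : List Bool → List Bool → List Bool → List Int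
  | a :: as, b :: bs, c :: cs => pvWin a b c :: pvWinList as bs cs
  | _, _, _ => []

lemma pvToI_eq_one (a : Bool) : pvToI a = 1 ↔ a = true := by cases a <;> simp [pvToI]

lemma pvLinSum_eq (l : List Bool) : ∀ a b,
    pvLinSum a b l = (pvWinList (a :: b :: l) (b :: l) l).sum := by
  induction l with
  | nil => intro a b; simp [pvLinSum, pvWinList]
  | cons c l ih => intro a b; simp [pvLinSum, pvWinList, ih]

lemma pvP2_snoc (l : List Bool) : ∀ a b y, pvP2 a b (l ++ [y]) = ((pvP2 a b l).2, y) := by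
  induction l with
  | nil => intro a b y; simp [pvP2]
  | cons c l ih => intro a b y; simp [pvP2, ih]

lemma pvLinSum_snoc (l : List Bool) : ∀ a b y,
    pvLinSum a b (l ++ [y]) = pvLinSum a b l + pvWin (pvP2 a b l).1 (pvP2 a b l).2 y := by
  induction l with
  | nil => intro a b y; simp [pvLinSum, pvP2]
  | cons c l ih => intro a b y; simp [pvLinSum, pvP2, ih]; ring

lemma pvLinSum_false (a a' : Bool) (l : List Bool) :
    pvLinSum a false l = pvLinSum a' false l := by
  cases l with
  | nil => rfl
  | cons c l => simp [pvLinSum, pvWin, pvToI]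

lemma pvP2_snd_indep (l : List Bool) (h : l ≠ []) :
    ∀ a b a' b', (pvP2 a b l).2 = (pvP2 a' b' l).2 := by
  induction l with
  | nil => exact absurd rfl h
  | cons c l ih =>
    intro a b a' b'
    cases l with
    | nil => rfl
    | cons d t => exact ih (by simp) b c b' c

lemma pvP2_getD (l : List Bool) : ∀ a b, 2 ≤ l.length →
    pvP2 a b l = (l.getD (l.length - 2) false, l.getD (l.length - 1) false) := by
  induction l with
  | nil => intro a b h; simp at h
  | cons c t ih =>
    intro a b h
    cases t with
    | nil => simp at h
    | cons d t' =>
      cases t' with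
      | nil => simp [pvP2]
      | cons e t'' =>
        have h2 : 2 ≤ (d :: e :: t'').length := by simp
        rw [show pvP2 a b (c :: d :: e :: t'') = pvP2 b c (d :: e :: t'') from rfl, ih b c h2]
        have l1 : (c :: d :: e :: t'').length - 2 = ((d :: e :: t'').length - 2) + 1 := by
          simp [List.length_cons]
        have l2 : (c :: d :: e :: t'').length - 1 = ((d :: e :: t'').length - 1) + 1 := by
          simp [List.length_cons]
        rw [l1, l2, List.getD_cons_succ, List.getD_cons_succ]

lemma pvTrail_snoc (l : List Bool) : ∀ (r : Int) (y : Bool),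
    pvTrail r (l ++ [y]) = if y then pvTrail r l + 1 else 0 := by
  induction l with
  | nil => intro r y; simp [pvTrail]
  | cons c l ih => intro r y; simp [pvTrail, ih]

lemma pvPc_zero : pvPc 0 = 0 := by simp [pvPc]

lemma pvRunScan (l : List Bool) : ∀ (ans run : Int) (a b : Bool), 0 ≤ run →
    (run = 0 → b = false) → (run = 1 → a = false ∧ b = true) → (2 ≤ run → a = true ∧ b = true) →
    (l.foldl (fun (st : Int × Int) b =>
        if b then (st.1, st.2 + 1)
        else (if st.2 ≠ 0 then st.1 + max (st.2 - 1) 1 else st.1, 0)) (ans, run)).1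
      = ans + pvPc run + pvLinSum a b l - pvPc (pvTrail run l) := by
  induction l with
  | nil => intro ans run a b h0 hc0 hc1 hc2; simp [pvLinSum, pvTrail]
  | cons c l ih =>
    intro ans run a b h0 hc0 hc1 hc2
    cases c with
    | false =>
      rw [List.foldl_cons]
      have hst : (if (false : Bool) = true then ((ans, run).1, (ans, run).2 + 1)
          else (if (ans, run).2 ≠ 0 then (ans, run).1 + max ((ans, run).2 - 1) 1 else (ans, run).1, 0))
          = (ans + pvPc run, 0) := by
        simp only [Bool.false_eq_true, if_false]
        unfold pvPc
        split_ifs <;> simp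
      rw [hst,
        ih (ans + pvPc run) 0 b false le_rfl (fun _ => rfl)
          (by omega) (by omega)]
      have : pvTrail run (false :: l) = pvTrail 0 l := by simp [pvTrail]
      rw [this]
      have hw : pvWin a b false = 0 := by simp [pvWin, pvToI]
      simp only [pvLinSum, hw, pvPc_zero]
      ring
    | true =>
      have hb1 : 1 ≤ run → b = true := by
        intro h
        rcases lt_or_ge run 2 with h' | h'
        · exact (hc1 (by omega)).2
        · exact (hc2 h').2
      rw [List.foldl_cons,
        show (if (true : Bool) = true then ((ans, run).1, (ans, run).2 + 1)
          else (if (ans, run).2 ≠ 0 then (ans, run).1 + max ((ans, run).2 - 1) 1 else (ans, run).1, 0))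
          = (ans, run + 1) from rfl,
        ih ans (run + 1) b true (by omega) (by omega)
          (by intro h; exact ⟨hc0 (by omega), rfl⟩)
          (by intro h; exact ⟨hb1 (by omega), rfl⟩)]
      have ht : pvTrail run (true :: l) = pvTrail (run + 1) l := by simp [pvTrail]
      rw [ht]
      have hpc : pvPc (run + 1) = pvPc run + pvWin a b true := by
        rcases eq_or_lt_of_le h0 with h' | h'
        · have hb := hc0 h'.symm
          subst hb
          rw [← h']
          norm_num [pvPc, pvWin, pvToI]
        · rcases lt_or_ge run 2 with h'' | h''
          · have h1 : run = 1 := by omega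
            obtain ⟨ha, hb⟩ := hc1 h1
            subst ha; subst hb; subst h1
            norm_num [pvPc, pvWin, pvToI]
          · obtain ⟨ha, hb⟩ := hc2 h''
            subst ha; subst hb
            have e1 : pvPc (run + 1) = run := by
              simp only [pvPc, if_pos (by omega : run + 1 ≠ 0)]; omega
            have e2 : pvPc run = run - 1 := by
              simp only [pvPc, if_pos (by omega : run ≠ 0)]; omega
            rw [e1, e2]; simp [pvWin, pvToI]
      simp only [pvLinSum]
      rw [hpc]; ring

lemma pvWinList_length (xs : List Bool) : ∀ ys zs,
    (pvWinList xs ys zs).length = min xs.length (min ys.length zs.length) := by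
  induction xs with
  | nil => intro ys zs; simp [pvWinList]
  | cons a as ih =>
    intro ys zs
    cases ys with
    | nil => simp [pvWinList]
    | cons b bs =>
      cases zs with
      | nil => simp [pvWinList]
      | cons c cs => simp [pvWinList, ih]

lemma pvWinList_getD (xs : List Bool) : ∀ ys zs (k : Nat),
    k < xs.length → k < ys.length → k < zs.length →
    (pvWinList xs ys zs).getD k 0 = pvWin (xs.getD k false) (ys.getD k false) (zs.getD k false) := by
  induction xs with
  | nil => intro ys zs k h _ _; simp at h
  | cons a as ih =>
    intro ys zs k hx hy hz
    cases ys with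
    | nil => simp at hy
    | cons b bs =>
      cases zs with
      | nil => simp at hz
      | cons c cs =>
        cases k with
        | zero => simp [pvWinList]
        | succ k => simpa [pvWinList] using ih bs cs k (by simpa using hx) (by simpa using hy) (by simpa using hz)

lemma pvSum3 {α : Type} (l : List α) (f g h : α → Int) :
    (l.map (fun x => f x - g x + h x)).sum = (l.map f).sum - (l.map g).sum + (l.map h).sum := by
  induction l with
  | nil => simp
  | cons x l ih => simp [ih]; ring

lemma pvCirc_rotate_one (l : List Bool) (h : 2 ≤ l.length) :
    pvCirc (l.rotate 1) = pvCirc l := by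
  rcases l with _ | ⟨x, _ | ⟨c, t⟩⟩
  · simp at h
  · simp at h
  · have hrot : (x :: c :: t).rotate 1 = (c :: t) ++ [x] := by
      rw [List.rotate_cons_succ, List.rotate_zero]
    rw [hrot]
    unfold pvCirc
    rw [pvP2_snoc]
    dsimp only
    rw [pvLinSum_snoc]
    have hA : (pvP2 false false (c :: t)).2 = (pvP2 false false (x :: c :: t)).2 := by
      rw [show pvP2 false false (x :: c :: t) = pvP2 false x (c :: t) from rfl]
      exact pvP2_snd_indep (c :: t) (by simp) false false false x
    rw [hA]
    rw [show pvP2 ((pvP2 false false (x :: c :: t)).2) x (c :: t)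
        = pvP2 false false (x :: c :: t) from rfl]
    rw [show pvLinSum (pvP2 false false (x :: c :: t)).1 (pvP2 false false (x :: c :: t)).2 (x :: c :: t)
        = pvWin (pvP2 false false (x :: c :: t)).1 (pvP2 false false (x :: c :: t)).2 x
          + pvLinSum (pvP2 false false (x :: c :: t)).2 x (c :: t) from rfl]
    ring

lemma pvCirc_rotate (l : List Bool) (h : 2 ≤ l.length) (m : Nat) :
    pvCirc (l.rotate m) = pvCirc l := by
  induction m with
  | zero => simp
  | succ m ih =>
    have : l.rotate (m + 1) = (l.rotate m).rotate 1 := by rw [List.rotate_rotate]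
    rw [this, pvCirc_rotate_one _ (by rwa [List.length_rotate]), ih]

lemma pvMapWin (E : List Bool) (h2 : 2 ≤ E.length) :
    (PySem.List.pyRange 0 (E.length : Int) 1).map
        (fun j => pvWin (PySem.List.pyGetD E (j - 2) false) (PySem.List.pyGetD E (j - 1) false)
          (PySem.List.pyGetD E j false))
      = pvWinList (PySem.List.pyGetD E (-2) false :: PySem.List.pyGetD E (-1) false :: E)
          (PySem.List.pyGetD E (-1) false :: E) E := by
  apply List.ext_getElem
  · simp [PySem.List.length_pyRange_one, pvWinList_length]; omega
  · intro k hk1 hk2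
    have hkn : k < E.length := by
      rw [List.length_map, PySem.List.length_pyRange_one] at hk1; omega
    rw [List.getElem_map, PySem.List.getElem_pyRange_one]
    rw [← List.getD_eq_getElem _ 0 hk2]
    rw [pvWinList_getD _ _ _ k (by simp; omega) (by simp; omega) hkn]
    simp only [zero_add]
    rcases k with _ | _ | k
    · norm_num [PySem.List.pyGetD_ofNat', List.getD_eq_getElem?_getD, List.getD]
    · norm_num [PySem.List.pyGetD_ofNat', List.getD_eq_getElem?_getD, List.getD]
    · have e2 : ((k + 2 : Nat) : Int) - 2 = ((k : Nat) : Int) := by push_cast; ring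
      have e1 : ((k + 2 : Nat) : Int) - 1 = ((k + 1 : Nat) : Int) := by push_cast; ring
      rw [e2, e1, PySem.List.pyGetD_natCast, PySem.List.pyGetD_natCast, PySem.List.pyGetD_natCast]
      rfl

lemma pvCirc_eq_sum (E : List Bool) (h2 : 2 ≤ E.length) :
    pvCirc E = ((PySem.List.pyRange 0 (E.length : Int) 1).map
        (fun j => pvWin (PySem.List.pyGetD E (j - 2) false) (PySem.List.pyGetD E (j - 1) false)
          (PySem.List.pyGetD E j false))).sum := by
  have hne : E ≠ [] := by intro h; subst h; simp at h2
  have e2 : PySem.List.pyGetD E (-2) false = E.getD (E.length - 2) false := by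
    rw [PySem.List.pyGetD_neg_ofNat E 2 false (by norm_num) (by omega),
      List.getD_eq_getElem _ _ (by omega)]
  have e1 : PySem.List.pyGetD E (-1) false = E.getD (E.length - 1) false := by
    rw [PySem.List.pyGetD_neg_one E false hne, List.getLast_eq_getElem,
      List.getD_eq_getElem _ _ (by omega)]
  rw [pvMapWin E h2, e2, e1]
  unfold pvCirc
  rw [pvP2_getD E false false h2]
  dsimp only
  rw [pvLinSum_eq]

lemma pvTwo (E : List Bool) (i j : Nat) (hij : i < j) (hj : j < E.length)
    (hi1 : E.getD i false = true) (hj1 : E.getD j false = true) : 2 ≤ E.countP id := by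
  have hsplit : E.countP id = (E.take j).countP id + (E.drop j).countP id := by
    rw [← List.countP_append, List.take_append_drop]
  have hdrop : 1 ≤ (E.drop j).countP id := by
    rw [← List.getElem_cons_drop hj, List.countP_cons]
    have hEj : E[j] = true := by rw [← List.getD_eq_getElem E false hj]; exact hj1
    simp [hEj]
  have htake : 1 ≤ (E.take j).countP id := by
    have hi' : i < (E.take j).length := by simp [List.length_take]; omega
    have hval : (E.take j)[i] = true := by
      rw [List.getElem_take, ← List.getD_eq_getElem E false (by omega)]; exact hi1
    have hmem : (true : Bool) ∈ E.take j := hval ▸ List.getElem_mem hi'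
    have hpos : 0 < (E.take j).countP id := by
      rw [List.countP_pos_iff]
      exact ⟨true, hmem, rfl⟩
    omega
  omega

-- The circular edge-parity list both programs work on (proof-side name for B's `edges`)
def pvE (nums : List Int) : List Bool :=
  (PySem.List.pyRange 0 (nums.length : Int) 1).map
    (fun i => PySem.Int.mod (PySem.List.pyGetD nums (i - 1) 0 + PySem.List.pyGetD nums i 0) 2 == 0)

lemma pvE_length (nums : List Int) : (pvE nums).length = nums.length := by
  simp [pvE, PySem.List.length_pyRange_one]

lemma pvLoop1 (nums : List Int) :
    (PySem.List.pyRange (-1) ((nums.length : Int) - 1) 1).foldl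
      (fun (st : List Int × Int) i =>
        if PySem.Int.mod (PySem.List.pyGetD nums i 0 + PySem.List.pyGetD nums (i + 1) 0) 2 = 0 then
          (st.1 ++ [1], st.2 + 1)
        else (st.1 ++ [0], st.2)) ([], 0)
    = ((pvE nums).map pvToI, ((pvE nums).countP id : Int)) := by
  have hsplit : (fun (st : List Int × Int) i =>
      if PySem.Int.mod (PySem.List.pyGetD nums i 0 + PySem.List.pyGetD nums (i + 1) 0) 2 = 0 then
        (st.1 ++ [1], st.2 + 1)
      else (st.1 ++ [0], st.2))
    = (fun (st : List Int × Int) i =>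
        ((fun (l : List Int) (i : Int) =>
            l ++ [if PySem.Int.mod (PySem.List.pyGetD nums i 0 + PySem.List.pyGetD nums (i + 1) 0) 2 = 0 then (1 : Int) else 0]) st.1 i,
         (fun (c : Int) (i : Int) =>
            if PySem.Int.mod (PySem.List.pyGetD nums i 0 + PySem.List.pyGetD nums (i + 1) 0) 2 = 0 then c + 1 else c) st.2 i)) := by
    funext st i
    by_cases h : PySem.Int.mod (PySem.List.pyGetD nums i 0 + PySem.List.pyGetD nums (i + 1) 0) 2 = 0
    · simp only [if_pos h]
    · simp only [if_neg h]
  rw [hsplit, PySem.List.foldl_prod_mk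
    (f := fun (l : List Int) (i : Int) =>
      l ++ [if PySem.Int.mod (PySem.List.pyGetD nums i 0 + PySem.List.pyGetD nums (i + 1) 0) 2 = 0 then (1 : Int) else 0])
    (g := fun (c : Int) (i : Int) =>
      if PySem.Int.mod (PySem.List.pyGetD nums i 0 + PySem.List.pyGetD nums (i + 1) 0) 2 = 0 then c + 1 else c)]
  have hrange : PySem.List.pyRange (-1) ((nums.length : Int) - 1) 1
      = (PySem.List.pyRange 0 (nums.length : Int) 1).map (fun j => j - 1) := by
    rw [PySem.List.pyRange_one, PySem.List.pyRange_one, List.map_map]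
    have harg : ((nums.length : Int) - 1 - -1).toNat = ((nums.length : Int) - 0).toNat := by omega
    rw [harg]
    apply List.map_congr_left
    intro k _
    simp; ring
  rw [hrange,
    PySem.List.foldl_append_singleton_eq_map,
    PySem.List.foldl_ite_add_one, List.map_map, List.countP_map]
  refine Prod.ext ?_ ?_
  · show _ ++ _ = _
    rw [List.nil_append]
    unfold pvE
    rw [List.map_map]
    apply List.map_congr_left
    intro j _
    have hj : j - 1 + 1 = j := by ring
    simp only [Function.comp, hj, pvToI]
    simp
  · show (0 : Int) + _ = _
    rw [zero_add]
    unfold pvE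
    rw [List.countP_map]
    congr 1
    apply List.countP_congr
    intro j _
    have hj : j - 1 + 1 = j := by ring
    simp only [Function.comp, hj, id]
    simp

lemma pvLoop2 (E : List Bool) :
    (PySem.List.pyRange 0 (((E.map pvToI).length : Nat) : Int) 1).foldl
      (fun (st : Int × Int) i =>
        if PySem.List.pyGetD (E.map pvToI) i 0 = 1 ∧ PySem.List.pyGetD (E.map pvToI) (i - 1) 0 = 1 then
          (st.1 + 1, if PySem.List.pyGetD (E.map pvToI) (i - 2) 0 = 1 then st.2 + 1 else st.2)
        else st) (0, 0)
    = (((PySem.List.pyRange 0 (E.length : Int) 1).countP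
          (fun j => PySem.List.pyGetD E j false && PySem.List.pyGetD E (j - 1) false) : Int),
       ((PySem.List.pyRange 0 (E.length : Int) 1).countP
          (fun j => (PySem.List.pyGetD E j false && PySem.List.pyGetD E (j - 1) false)
            && PySem.List.pyGetD E (j - 2) false) : Int)) := by
  have hgd : ∀ (i : Int), PySem.List.pyGetD (E.map pvToI) i 0 = pvToI (PySem.List.pyGetD E i false) := by
    intro i
    simpa using PySem.List.pyGetD_map pvToI E i false
  have hsplit : (fun (st : Int × Int) i =>
      if PySem.List.pyGetD (E.map pvToI) i 0 = 1 ∧ PySem.List.pyGetD (E.map pvToI) (i - 1) 0 = 1 then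
        (st.1 + 1, if PySem.List.pyGetD (E.map pvToI) (i - 2) 0 = 1 then st.2 + 1 else st.2)
      else st)
    = (fun (st : Int × Int) i =>
        ((fun (c : Int) (i : Int) =>
            if PySem.List.pyGetD (E.map pvToI) i 0 = 1 ∧ PySem.List.pyGetD (E.map pvToI) (i - 1) 0 = 1 then c + 1 else c) st.1 i,
         (fun (c : Int) (i : Int) =>
            if (PySem.List.pyGetD (E.map pvToI) i 0 = 1 ∧ PySem.List.pyGetD (E.map pvToI) (i - 1) 0 = 1)
                ∧ PySem.List.pyGetD (E.map pvToI) (i - 2) 0 = 1 then c + 1 else c) st.2 i)) := by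
    funext st i
    by_cases h1 : PySem.List.pyGetD (E.map pvToI) i 0 = 1 ∧ PySem.List.pyGetD (E.map pvToI) (i - 1) 0 = 1
    · by_cases h2 : PySem.List.pyGetD (E.map pvToI) (i - 2) 0 = 1
      · simp only [if_pos h1, if_pos h2, if_pos (And.intro h1 h2)]
      · simp only [if_pos h1, if_neg h2, if_neg (fun hh : _ ∧ _ => h2 hh.2)]
    · simp only [if_neg h1, if_neg (fun hh : _ ∧ _ => h1 hh.1)]
  rw [hsplit, PySem.List.foldl_prod_mk
    (f := fun (c : Int) (i : Int) =>
      if PySem.List.pyGetD (E.map pvToI) i 0 = 1 ∧ PySem.List.pyGetD (E.map pvToI) (i - 1) 0 = 1 then c + 1 else c)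
    (g := fun (c : Int) (i : Int) =>
      if (PySem.List.pyGetD (E.map pvToI) i 0 = 1 ∧ PySem.List.pyGetD (E.map pvToI) (i - 1) 0 = 1)
          ∧ PySem.List.pyGetD (E.map pvToI) (i - 2) 0 = 1 then c + 1 else c),
    PySem.List.foldl_ite_add_one, PySem.List.foldl_ite_add_one]
  have hlen : ((E.map pvToI).length : Int) = (E.length : Int) := by simp
  rw [hlen]
  simp only [zero_add, Prod.mk.injEq]
  constructor
  · congr 1
    apply List.countP_congr
    intro j _
    simp only [hgd, pvToI_eq_one, decide_eq_true_eq]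
    cases hx : PySem.List.pyGetD E j false <;>
      cases hy : PySem.List.pyGetD E (j - 1) false <;> simp
  · congr 1
    apply List.countP_congr
    intro j _
    simp only [hgd, pvToI_eq_one, decide_eq_true_eq]
    cases hx : PySem.List.pyGetD E j false <;>
      cases hy : PySem.List.pyGetD E (j - 1) false <;>
        cases hz : PySem.List.pyGetD E (j - 2) false <;> simp

lemma pvCount_eq (E : List Bool) :
    E.countP id = (PySem.List.pyRange 0 (E.length : Int) 1).countP
      (fun j => PySem.List.pyGetD E j false) := by
  conv_lhs => rw [← PySem.List.map_pyGetD_pyRange_zero' E false]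
  rw [List.countP_map]
  rfl

lemma pvLen2 (nums : List Int) (h : ¬ (pvE nums).all id = true) : 2 ≤ (pvE nums).length := by
  rcases nums with _ | ⟨x, _ | ⟨y, t⟩⟩
  · exfalso
    apply h
    have : pvE ([] : List Int) = [] := by
      unfold pvE
      rw [PySem.List.pyRange_one_eq_nil (by norm_num)]
      rfl
    rw [this]; rfl
  · exfalso
    apply h
    have h1 : pvE [x] = [PySem.Int.mod (PySem.List.pyGetD [x] (-1) 0 + PySem.List.pyGetD [x] 0 0) 2 == 0] := by
      unfold pvE
      rw [show ((([x] : List Int).length : Int)) = 0 + 1 by norm_num, PySem.List.pyRange_one_singleton]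
      norm_num
    have h2 : PySem.List.pyGetD [x] (-1) 0 = x := by
      rw [PySem.List.pyGetD_neg_one [x] 0 (by simp)]; rfl
    have h3 : PySem.List.pyGetD [x] 0 0 = x := by
      rw [PySem.List.pyGetD_zero]; rfl
    rw [h1, h2, h3]
    simp only [List.all_cons, List.all_nil, Bool.and_true, id]
    simp
    exact ⟨x, by ring⟩
  · rw [pvE_length]; simp

lemma pvSumWin (E : List Bool) (h2 : 2 ≤ E.length) :
    pvCirc E = (E.countP id : Int)
      - ((PySem.List.pyRange 0 (E.length : Int) 1).countP
          (fun j => PySem.List.pyGetD E j false && PySem.List.pyGetD E (j - 1) false) : Int)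
      + ((PySem.List.pyRange 0 (E.length : Int) 1).countP
          (fun j => (PySem.List.pyGetD E j false && PySem.List.pyGetD E (j - 1) false)
            && PySem.List.pyGetD E (j - 2) false) : Int) := by
  rw [pvCirc_eq_sum E h2, pvCount_eq E,
    ← PySem.List.sum_map_ite_one_zero (fun j => PySem.List.pyGetD E j false),
    ← PySem.List.sum_map_ite_one_zero (fun j => PySem.List.pyGetD E j false && PySem.List.pyGetD E (j - 1) false),
    ← PySem.List.sum_map_ite_one_zero (fun j => (PySem.List.pyGetD E j false && PySem.List.pyGetD E (j - 1) false)
      && PySem.List.pyGetD E (j - 2) false),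
    ← pvSum3]
  apply congrArg List.sum
  apply List.map_congr_left
  intro j _
  cases hx : PySem.List.pyGetD E j false <;>
    cases hy : PySem.List.pyGetD E (j - 1) false <;>
    cases hz : PySem.List.pyGetD E (j - 2) false <;> simp [pvWin, pvToI]

lemma pvPzero (E : List Bool) (h2 : 2 ≤ E.length) (hc : E.countP id ≤ 1) :
    (PySem.List.pyRange 0 (E.length : Int) 1).countP
        (fun j => PySem.List.pyGetD E j false && PySem.List.pyGetD E (j - 1) false) = 0
    ∧ (PySem.List.pyRange 0 (E.length : Int) 1).countP
        (fun j => (PySem.List.pyGetD E j false && PySem.List.pyGetD E (j - 1) false)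
          && PySem.List.pyGetD E (j - 2) false) = 0 := by
  have hne : E ≠ [] := by intro h; subst h; simp at h2
  have h1 : (PySem.List.pyRange 0 (E.length : Int) 1).countP
      (fun j => PySem.List.pyGetD E j false && PySem.List.pyGetD E (j - 1) false) = 0 := by
    by_contra hc1
    obtain ⟨j, hjmem, hjp⟩ := List.countP_pos_iff.mp (Nat.pos_of_ne_zero hc1)
    obtain ⟨hj0, hjlt⟩ := PySem.List.mem_pyRange_one.mp hjmem
    obtain ⟨hpj, hpj1⟩ := Bool.and_eq_true_iff.mp hjp
    set k : Nat := j.toNat with hk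
    have hjk : j = (k : Int) := by omega
    have hklt : k < E.length := by omega
    have hgk : E.getD k false = true := by
      rw [← PySem.List.pyGetD_natCast, ← hjk]; exact hpj
    rcases Nat.eq_zero_or_pos k with hk0 | hkpos
    · have hj1 : PySem.List.pyGetD E (j - 1) false = PySem.List.pyGetD E (-1) false := by
        rw [hjk, hk0]; norm_num
      have hlast : E.getD (E.length - 1) false = true := by
        rw [List.getD_eq_getElem _ _ (by omega), ← List.getLast_eq_getElem hne,
          ← PySem.List.pyGetD_neg_one E false hne, ← hj1]
        exact hpj1
      have := pvTwo E 0 (E.length - 1) (by omega) (by omega) (by rw [← hk0]; exact hgk) hlast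
      omega
    · have hj1 : j - 1 = ((k - 1 : Nat) : Int) := by omega
      have hgk1 : E.getD (k - 1) false = true := by
        rw [← PySem.List.pyGetD_natCast, ← hj1]; exact hpj1
      have := pvTwo E (k - 1) k (by omega) hklt hgk1 hgk
      omega
  refine ⟨h1, ?_⟩
  have hle := List.countP_mono_left (l := PySem.List.pyRange 0 (E.length : Int) 1)
    (p := fun j => (PySem.List.pyGetD E j false && PySem.List.pyGetD E (j - 1) false)
      && PySem.List.pyGetD E (j - 2) false)
    (q := fun j => PySem.List.pyGetD E j false && PySem.List.pyGetD E (j - 1) false)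
    (fun j _ hp => (Bool.and_eq_true_iff.mp hp).1)
  omega

lemma main_eq (nums : List Int) : solution nums = solution_alt nums := by
  unfold solution solution_alt
  simp only []
  rw [pvLoop1 nums]
  rw [show (PySem.List.pyRange 0 ((nums.length : Int)) 1).map
      (fun i => PySem.Int.mod (PySem.List.pyGetD nums (i - 1) 0 + PySem.List.pyGetD nums i 0) 2 == 0)
      = pvE nums from rfl]
  dsimp only
  by_cases hall : (pvE nums).all id = true
  · rw [if_pos hall]
    have hcnt : (pvE nums).countP id = (pvE nums).length :=
      List.countP_eq_length.mpr (List.all_eq_true.mp hall)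
    rw [if_pos (by simp [hcnt] : (((pvE nums).countP id : Nat) : Int) = ((List.map pvToI (pvE nums)).length : Int))]
    congr 1
    simp [pvE_length]
  · rw [if_neg hall]
    have h2 : 2 ≤ (pvE nums).length := pvLen2 nums hall
    have hncond : ¬ ((((pvE nums).countP id : Nat) : Int) = ((List.map pvToI (pvE nums)).length : Int)) := by
      simp only [List.length_map, Int.natCast_inj]
      intro hh
      exact hall (List.all_eq_true.mpr (List.countP_eq_length.mp hh))
    rw [if_neg hncond]
    have hf : (false : Bool) ∈ pvE nums := by
      by_contra hf
      apply hall
      rw [List.all_eq_true]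
      intro x hx
      cases x
      · exact absurd hx hf
      · rfl
    obtain ⟨kN, hksome⟩ := Option.isSome_iff_exists.mp
      ((PySem.List.index?_isSome_iff (pvE nums) false).mpr hf)
    obtain ⟨hklt, hEk, -⟩ := PySem.List.getElem_of_index?_eq_some hksome
    rw [hksome]
    simp only [Option.getD_some]
    have hkk : ((kN : Int) + 1).toNat = kN + 1 := by omega
    rw [PySem.List.slice_from _ (by omega), PySem.List.slice_to _ (by omega), hkk]
    have hrot_rotate : (pvE nums).drop (kN + 1) ++ (pvE nums).take (kN + 1)
        = (pvE nums).rotate (kN + 1) :=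
      (List.rotate_eq_drop_append_take (by omega)).symm
    have hsnoc : (pvE nums).drop (kN + 1) ++ (pvE nums).take (kN + 1)
        = ((pvE nums).drop (kN + 1) ++ (pvE nums).take kN) ++ [false] := by
      rw [List.take_add_one, List.getElem?_eq_getElem hklt, hEk]
      simp
    have hBval : (((pvE nums).drop (kN + 1) ++ (pvE nums).take (kN + 1)).foldl
        (fun (st : Int × Int) b =>
          if b then (st.1, st.2 + 1)
          else (if st.2 ≠ 0 then st.1 + max (st.2 - 1) 1 else st.1, 0)) (0, 0)).1
        = pvCirc (pvE nums) := by
      rw [pvRunScan _ 0 0 false false le_rfl (fun _ => rfl) (by omega) (by omega)]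
      have htr : pvTrail 0 ((pvE nums).drop (kN + 1) ++ (pvE nums).take (kN + 1)) = 0 := by
        rw [hsnoc, pvTrail_snoc]; rfl
      have hp2 : (pvP2 false false ((pvE nums).drop (kN + 1) ++ (pvE nums).take (kN + 1))).2 = false := by
        rw [hsnoc, pvP2_snoc]
      have hlin : pvLinSum false false ((pvE nums).drop (kN + 1) ++ (pvE nums).take (kN + 1))
          = pvCirc ((pvE nums).drop (kN + 1) ++ (pvE nums).take (kN + 1)) := by
        unfold pvCirc
        rw [hp2]
        exact pvLinSum_false false _ _
      rw [htr, pvPc_zero, hlin, hrot_rotate, pvCirc_rotate _ h2]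
      ring
    rw [hBval, pvLoop2 (pvE nums)]
    by_cases hlt : (((pvE nums).countP id : Nat) : Int) < 2
    · rw [if_pos hlt]
      obtain ⟨hz1, hz2⟩ := pvPzero (pvE nums) h2 (by omega)
      rw [pvSumWin (pvE nums) h2, hz1, hz2]
      simp
    · rw [if_neg hlt]
      dsimp only
      exact (pvSumWin (pvE nums) h2).symm

-- ===== VERDICT (by name: the statement is the Claim_ definition above) =====
theorem solution_spec : Claim_equal_solution := by
  intro nums _
  unfold Spec_solution
  exact main_eq nums
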